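-- pv_equiv track=rewrite | github.com/lesleytomosada/codewars | 6 kyu/2023-07-11_word_a10n_(abbreviation).py | abbreviate2
-- ===== SOURCE A (Python) =====
-- def shorten(word):
--     if len(word) < 4:
--         return word
--     return word[0] + str(len(word[0:-2])) + word[-1]
--
-- def abbreviate2(s):
--     ret = ""
--     word = ""
--     for char in s:
--         if char.isalpha():
--             word += char
--         else:
--             ret += shorten(word) + char
--             word = ""
--     ret += shorten(word)
--     return ret
-- ===== SOURCE B (Python) =====
-- from itertools import groupby
--
--
-- def shorten(word):
--     if len(word) < 4:
--         return word
--     return word[0] + str(len(word[0:-2])) + word[-1]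
--
--
-- def abbreviate2(s):
--     return ''.join(
--         shorten(''.join(g)) if alpha else ''.join(g)
--         for alpha, g in groupby(s, str.isalpha)
--     )
-- ===== Notes on version B (the rewrite author's own statement) =====
-- stated objective: idiomatic
-- what changed: Replaced the char-by-char accumulator loop (ret/word state) with itertools.groupby on str.isalpha: the string is split into maximal alpha/non-alpha runs, shorten is mapped over the alphabetic runs, and the pieces are joined.
import Mathlib
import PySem

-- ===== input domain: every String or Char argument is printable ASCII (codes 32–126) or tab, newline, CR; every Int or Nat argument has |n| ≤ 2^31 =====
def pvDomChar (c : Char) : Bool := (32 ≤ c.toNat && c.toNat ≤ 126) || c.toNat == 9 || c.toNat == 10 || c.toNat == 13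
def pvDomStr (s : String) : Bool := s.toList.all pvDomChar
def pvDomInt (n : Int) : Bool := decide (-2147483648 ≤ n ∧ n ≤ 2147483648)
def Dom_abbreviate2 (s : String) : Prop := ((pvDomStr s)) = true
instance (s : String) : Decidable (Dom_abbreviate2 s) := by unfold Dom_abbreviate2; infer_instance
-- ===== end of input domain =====

-- B replaces A's char-by-char ret/word accumulator loop with a group-by-isalpha
-- decomposition (maximal runs, shorten mapped over the alphabetic runs); same cost,
-- the objective is a more idiomatic decomposition. Return values only; no mutation.

-- ===== PORT A =====
-- shorten(word) of A
def pvShortenA (w : List Char) : List Char :=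
  if w.length < 4 then w
  else (PySem.List.pyGet? w 0).toList
       ++ PySem.Int.toChars ((PySem.List.slice w (some 0) (some (-2))).length : Int)
       ++ (PySem.List.pyGet? w (-1)).toList

-- body of A's for-loop over (ret, word)
def pvStepA (p : List Char × List Char) (c : Char) : List Char × List Char :=
  if PySem.Chars.isalpha c then (p.1, p.2 ++ [c])
  else (p.1 ++ pvShortenA p.2 ++ [c], [])

def abbreviate2 (s : String) : String :=
  let st := s.toList.foldl pvStepA ([], [])
  String.ofList (st.1 ++ pvShortenA st.2)

-- ===== PORT B =====
-- B keeps shorten as-is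
def pvShortenB (w : List Char) : List Char :=
  if w.length < 4 then w
  else (PySem.List.pyGet? w 0).toList
       ++ PySem.Int.toChars ((PySem.List.slice w (some 0) (some (-2))).length : Int)
       ++ (PySem.List.pyGet? w (-1)).toList

-- itertools.groupby(s, str.isalpha): maximal runs tagged with the key
def pvGroupRuns : List Char → List (Bool × List Char)
  | [] => []
  | c :: cs =>
      (PySem.Chars.isalpha c,
       c :: cs.takeWhile (fun d => PySem.Chars.isalpha d == PySem.Chars.isalpha c)) ::
      pvGroupRuns (cs.dropWhile (fun d => PySem.Chars.isalpha d == PySem.Chars.isalpha c))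
termination_by cs => cs.length
decreasing_by simpa using Nat.lt_succ_of_le (List.length_dropWhile_le _ _)

def abbreviate2_alt (s : String) : String :=
  String.ofList (((pvGroupRuns s.toList).map
    (fun g => if g.1 then pvShortenB g.2 else g.2)).flatten)

-- ===== PRECONDITION & SPEC =====
def Spec_abbreviate2 (s : String) (out : String) : Prop := out = abbreviate2_alt s
instance (s : String) (out : String) : Decidable (Spec_abbreviate2 s out) := by unfold Spec_abbreviate2; infer_instance

-- ===== CLAIM (what is proved, stated in full; the proofs are below) =====
def Claim_equal_abbreviate2 : Prop := ∀ (s : String), Dom_abbreviate2 s → Spec_abbreviate2 s (abbreviate2 s)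

-- ===== LEMMAS AND PROOFS =====

-- B's output on a list of chars
def pvBout (cs : List Char) : List Char :=
  ((pvGroupRuns cs).map (fun g => if g.1 then pvShortenB g.2 else g.2)).flatten

-- A's output from loop state ([], word) followed by the trailing shorten
def pvAout (word cs : List Char) : List Char :=
  let st := cs.foldl pvStepA ([], word)
  st.1 ++ pvShortenA st.2

lemma pvShorten_eq (w : List Char) : pvShortenA w = pvShortenB w := rfl

lemma pvStepA_acc (cs : List Char) : ∀ ret word,
    cs.foldl pvStepA (ret, word)
      = (ret ++ (cs.foldl pvStepA ([], word)).1, (cs.foldl pvStepA ([], word)).2) := by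
  induction cs with
  | nil => simp
  | cons c cs ih =>
      intro ret word
      simp only [List.foldl_cons, pvStepA]
      by_cases h : PySem.Chars.isalpha c = true
      · simp only [h, if_true]
        exact ih ret (word ++ [c])
      · simp only [h, Bool.false_eq_true, if_false, List.nil_append]
        rw [ih (ret ++ pvShortenA word ++ [c]) [], ih (pvShortenA word ++ [c]) []]
        simp

lemma pvAout_nil (word : List Char) : pvAout word [] = pvShortenA word := by
  simp [pvAout]

lemma pvAout_cons_alpha {c : Char} (h : PySem.Chars.isalpha c = true) (word cs : List Char) :
    pvAout word (c :: cs) = pvAout (word ++ [c]) cs := by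
  simp [pvAout, pvStepA, h]

lemma pvAout_cons_nonalpha {c : Char} (h : PySem.Chars.isalpha c = false) (word cs : List Char) :
    pvAout word (c :: cs) = pvShortenA word ++ c :: pvAout [] cs := by
  simp only [pvAout, List.foldl_cons, pvStepA, h, if_false, List.nil_append, Bool.false_eq_true]
  rw [pvStepA_acc]
  simp

lemma pvTakeWhile_all_append {p : Char → Bool} (w rest : List Char)
    (hw : ∀ x ∈ w, p x = true) : (w ++ rest).takeWhile p = w ++ rest.takeWhile p := by
  induction w with
  | nil => simp
  | cons d w' ih =>
      simp only [List.cons_append, List.takeWhile_cons, hw d (by simp), if_true]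
      rw [ih (fun x hx => hw x (by simp [hx]))]

lemma pvDropWhile_all_append {p : Char → Bool} (w rest : List Char)
    (hw : ∀ x ∈ w, p x = true) : (w ++ rest).dropWhile p = rest.dropWhile p := by
  induction w with
  | nil => simp
  | cons d w' ih =>
      simp only [List.cons_append, List.dropWhile_cons, hw d (by simp), if_true]
      exact ih (fun x hx => hw x (by simp [hx]))

-- an all-alphabetic word followed by nothing or a non-alpha char is one group
lemma pvGroupRuns_alpha_run (w rest : List Char)
    (hw : ∀ x ∈ w, PySem.Chars.isalpha x = true)
    (hr : ∀ c ∈ rest.head?, PySem.Chars.isalpha c = false) (hne : w ≠ []) :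
    pvGroupRuns (w ++ rest) = (true, w) :: pvGroupRuns rest := by
  cases w with
  | nil => exact absurd rfl hne
  | cons d w' =>
      have hd : PySem.Chars.isalpha d = true := hw d (by simp)
      rw [List.cons_append, pvGroupRuns]
      simp only [hd]
      have hw' : ∀ x ∈ w', (PySem.Chars.isalpha x == true) = true := by
        intro x hx; simp [hw x (by simp [hx])]
      rw [pvTakeWhile_all_append w' rest hw', pvDropWhile_all_append w' rest hw']
      have htw : rest.takeWhile (fun x => PySem.Chars.isalpha x == true) = [] := by
        cases rest with
        | nil => simp
        | cons r rs => simp [hr r (by simp)]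
      have hdw : rest.dropWhile (fun x => PySem.Chars.isalpha x == true) = rest := by
        cases rest with
        | nil => simp
        | cons r rs => simp [hr r (by simp)]
      rw [htw, hdw]
      simp

lemma pvBout_cons_nonalpha {c : Char} (h : PySem.Chars.isalpha c = false) (cs : List Char) :
    pvBout (c :: cs) = c :: pvBout cs := by
  cases cs with
  | nil => simp [pvBout, pvGroupRuns, h]
  | cons d cs₂ =>
      by_cases hd : PySem.Chars.isalpha d = true
      · rw [pvBout, pvGroupRuns]
        simp [h, hd, pvBout]
      · have hd' : PySem.Chars.isalpha d = false := by simpa using hd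
        rw [pvBout, pvGroupRuns]
        simp only [h]
        rw [List.takeWhile_cons, List.dropWhile_cons]
        simp only [hd', beq_self_eq_true, if_true]
        conv_rhs => rw [pvBout, pvGroupRuns]
        simp [hd']

lemma pvMain (cs : List Char) : ∀ word, (∀ x ∈ word, PySem.Chars.isalpha x = true) →
    pvAout word cs = pvBout (word ++ cs) := by
  induction cs with
  | nil =>
      intro word hw
      rw [pvAout_nil, List.append_nil]
      cases word with
      | nil => simp [pvBout, pvGroupRuns, pvShortenA]
      | cons d w' =>
          have h1 := pvGroupRuns_alpha_run (d :: w') [] hw (by simp) (by simp)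
          rw [List.append_nil] at h1
          simp [pvBout, h1, pvGroupRuns, pvShorten_eq]
  | cons c cs ih =>
      intro word hw
      by_cases hc : PySem.Chars.isalpha c = true
      · rw [pvAout_cons_alpha hc,
           ih (word ++ [c]) (by
             intro x hx
             rcases List.mem_append.mp hx with h | h
             · exact hw x h
             · simp at h; simp [h, hc])]
        simp
      · have hc' : PySem.Chars.isalpha c = false := by simpa using hc
        rw [pvAout_cons_nonalpha hc', ih [] (by simp), List.nil_append]
        cases word with
        | nil => rw [List.nil_append, pvBout_cons_nonalpha hc']; simp [pvShortenA]
        | cons d w' =>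
            have h1 := pvGroupRuns_alpha_run (d :: w') (c :: cs) hw (by simp [hc']) (by simp)
            conv_rhs => rw [pvBout, h1]
            simp only [List.map_cons, List.flatten_cons, if_true]
            rw [← pvBout, pvBout_cons_nonalpha hc', pvShorten_eq]

-- ===== VERDICT (by name: the statement is the Claim_ definition above) =====
theorem abbreviate2_spec : Claim_equal_abbreviate2 := by
  intro s _
  show abbreviate2 s = abbreviate2_alt s
  have h := pvMain s.toList [] (by simp)
  simp only [List.nil_append] at h
  simpa [abbreviate2, abbreviate2_alt, pvAout, pvBout] using congrArg String.ofList h
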